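-- pv_equiv track=rewrite | github.com/Magmoc/Advent-of-Code-2020 | day7/read_input.py | invert_bag
-- ===== SOURCE A (Python) =====
-- def invert_bag(bag_dict):
--     inverted_bag_dict = {}
--
--     for bag, value in bag_dict.items():
--         for loop_bag, loop_value in bag_dict.items():
--             if bag in loop_value:
--                 if bag in inverted_bag_dict:
--                     inverted_bag_dict[bag].append(loop_bag)
--                 else:
--                     inverted_bag_dict[bag] = [loop_bag]
--
--     return inverted_bag_dict
-- ===== SOURCE B (Python) =====
-- def invert_bag(bag_dict):
--     # One pass over the edges: for each container bag, append it to the list of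
--     # every (distinct) bag its contents mention; then emit in bag_dict key order.
--     inv = {}
--     for container, contents in bag_dict.items():
--         for c in dict.fromkeys(contents):
--             inv.setdefault(c, []).append(container)
--     return {bag: inv[bag] for bag in bag_dict if bag in inv}
-- ===== Notes on version B (the rewrite author's own statement) =====
-- stated objective: faster
-- what changed: Instead of A's nested scan that tests every key against every value list, B makes a single pass over each bag's contents appending the container to each contained bag's list, then emits the lists in key order.
import Mathlib
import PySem

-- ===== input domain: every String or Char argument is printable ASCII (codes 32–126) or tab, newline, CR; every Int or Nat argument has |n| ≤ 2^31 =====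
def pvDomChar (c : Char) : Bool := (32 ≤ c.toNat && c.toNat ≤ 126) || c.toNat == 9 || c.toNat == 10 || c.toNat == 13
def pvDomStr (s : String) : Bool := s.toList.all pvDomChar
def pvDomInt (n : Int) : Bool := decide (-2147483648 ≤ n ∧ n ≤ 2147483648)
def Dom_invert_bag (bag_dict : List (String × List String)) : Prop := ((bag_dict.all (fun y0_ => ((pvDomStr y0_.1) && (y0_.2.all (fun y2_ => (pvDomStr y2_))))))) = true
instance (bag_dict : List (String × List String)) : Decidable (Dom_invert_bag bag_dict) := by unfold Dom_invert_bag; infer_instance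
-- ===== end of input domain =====

-- B replaces A's nested scan over all key pairs (O(n^2) membership tests) by one pass
-- over each bag's contents, appending the container to each contained bag's list.

-- ===== PORT A =====
-- A: for bag in keys: for (loop_bag, loop_value) in items: if bag in loop_value: append/create.
def invert_bag (bag_dict : List (String × List String)) : List (String × List String) :=
  (bag_dict.foldl (fun inv p =>
      bag_dict.foldl (fun inv q =>
        if p.1 ∈ q.2 then
          match inv.get? p.1 with
          | some l => inv.insert p.1 (l ++ [q.1])   -- inverted_bag_dict[bag].append(loop_bag)
          | none   => inv.insert p.1 [q.1]          -- inverted_bag_dict[bag] = [loop_bag]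
        else inv) inv)
    (PySem.Dict.empty : PySem.Dict String (List String))).items

-- ===== PORT B =====
-- inv.setdefault(c, []).append(container)  =  inv[c] = inv.get(c, []) + [container]  =  Dict.modify
def invert_bag_alt (bag_dict : List (String × List String)) : List (String × List String) :=
  let inv : PySem.Dict String (List String) :=
    bag_dict.foldl (fun inv p =>
      (PySem.List.dedup p.2).foldl (fun inv c => inv.modify c [] (· ++ [p.1])) inv)
      PySem.Dict.empty
  (bag_dict.foldl (fun acc p =>
      match inv.get? p.1 with
      | some v => acc.insert p.1 v
      | none   => acc)
    (PySem.Dict.empty : PySem.Dict String (List String))).items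

-- ===== PRECONDITION & SPEC =====
-- Pre_ excludes association lists with duplicate keys: they do not represent a Python
-- dict, which is A's declared parameter type (a dict's keys are always distinct).
def Pre_invert_bag (bag_dict : List (String × List String)) : Prop :=
  (bag_dict.map Prod.fst).Nodup
instance (bag_dict : List (String × List String)) : Decidable (Pre_invert_bag bag_dict) := by unfold Pre_invert_bag; infer_instance

def pvWitness_invert_bag : (List (String × List String)) :=
  [("a", ["b", "c"]), ("b", []), ("c", ["b"])]

def Spec_invert_bag (bag_dict : List (String × List String)) (out : List (String × List String)) : Prop := out = invert_bag_alt bag_dict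
instance (bag_dict : List (String × List String)) (out : List (String × List String)) : Decidable (Spec_invert_bag bag_dict out) := by unfold Spec_invert_bag; infer_instance

-- ===== CLAIM (what is proved, stated in full; the proofs are below) =====
def Claim_equal_invert_bag : Prop := ∀ (bag_dict : List (String × List String)), Dom_invert_bag bag_dict → Pre_invert_bag bag_dict → Spec_invert_bag bag_dict (invert_bag bag_dict)

-- ===== LEMMAS AND PROOFS =====

-- the containers of bag b, in bag_dict order (the common characterisation)
def pvCont (l : List (String × List String)) (b : String) : List String :=
  l.filterMap (fun q => if b ∈ q.2 then some q.1 else none)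

-- A's inner loop, abstracted: append all of cs to key b (creating it when needed)
def pvPush (inv : PySem.Dict String (List String)) (b : String) (cs : List String) :
    PySem.Dict String (List String) :=
  if cs = [] then inv else inv.insert b (inv.getD b [] ++ cs)

theorem pvPush_snoc (inv : PySem.Dict String (List String)) (b x : String) (cs : List String) :
    pvPush (inv.insert b (inv.getD b [] ++ [x])) b cs = pvPush inv b (x :: cs) := by
  unfold pvPush
  cases cs with
  | nil => simp
  | cons y ys =>
      simp only [reduceCtorEq, if_false]
      rw [PySem.Dict.getD_insert_self, PySem.Dict.insert_insert_self, List.append_assoc]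
      rfl

theorem pvA_step (inv : PySem.Dict String (List String)) (b x : String) :
    (match inv.get? b with
     | some l => inv.insert b (l ++ [x])
     | none   => inv.insert b [x]) = inv.insert b (inv.getD b [] ++ [x]) := by
  cases h : inv.get? b with
  | none => simp [PySem.Dict.getD_eq_get?_getD, h]
  | some l => simp [PySem.Dict.getD_eq_get?_getD, h]

theorem pvA_inner (rest : List (String × List String)) (b : String)
    (inv : PySem.Dict String (List String)) :
    rest.foldl (fun inv q =>
        if b ∈ q.2 then inv.insert b (inv.getD b [] ++ [q.1]) else inv) inv
      = pvPush inv b (pvCont rest b) := by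
  induction rest generalizing inv with
  | nil => simp [pvCont, pvPush]
  | cons q rest ih =>
      simp only [List.foldl_cons, pvCont, List.filterMap_cons]
      by_cases h : b ∈ q.2
      · simp only [h, if_true, ih, pvCont, pvPush_snoc]
      · simp only [h, if_false, ih, pvCont]

theorem pvA_outer (bd l : List (String × List String)) (inv : PySem.Dict String (List String))
    (hnd : (l.map Prod.fst).Nodup) (hfresh : ∀ p ∈ l, inv.contains p.1 = false) :
    (l.foldl (fun inv p => pvPush inv p.1 (pvCont bd p.1)) inv).items
      = inv.items ++ l.filterMap (fun p =>
          if pvCont bd p.1 = [] then none else some (p.1, pvCont bd p.1)) := by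
  induction l generalizing inv with
  | nil => simp
  | cons p l ih =>
      simp only [List.map_cons, List.nodup_cons] at hnd
      have hp : inv.contains p.1 = false := hfresh p (by simp)
      simp only [List.foldl_cons, List.filterMap_cons]
      by_cases hc : pvCont bd p.1 = []
      · have h0 : pvPush inv p.1 (pvCont bd p.1) = inv := by simp [pvPush, hc]
        rw [h0, ih inv hnd.2 (fun q hq => hfresh q (by simp [hq]))]
        simp [hc]
      · have h0 : pvPush inv p.1 (pvCont bd p.1) = inv.insert p.1 (pvCont bd p.1) := by
          simp [pvPush, hc, PySem.Dict.getD_of_not_contains _ _ hp]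
        rw [h0, ih _ hnd.2 ?_, PySem.Dict.items_insert_of_not_contains _ _ hp]
        · simp [hc]
        · intro q hq
          rw [PySem.Dict.contains_insert]
          have hne : q.1 ≠ p.1 := by
            intro h; exact hnd.1 (h ▸ (List.mem_map_of_mem hq))
          simp [hne, hfresh q (by simp [hq])]

-- the flattened edge list of B's nested loop
def pvEdges (bd : List (String × List String)) : List (String × String) :=
  bd.flatMap (fun p => (PySem.List.dedup p.2).map (fun c => (c, p.1)))

theorem pvB_flatten (bd : List (String × List String)) (d : PySem.Dict String (List String)) :
    bd.foldl (fun inv p =>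
        (PySem.List.dedup p.2).foldl (fun inv c => inv.modify c [] (· ++ [p.1])) inv) d
      = (pvEdges bd).foldl (fun d q => d.modify q.1 [] (· ++ [q.2])) d := by
  induction bd generalizing d with
  | nil => simp [pvEdges]
  | cons p bd ih =>
      simp only [List.foldl_cons, pvEdges, List.flatMap_cons, List.foldl_append, List.foldl_map]
      exact ih _

theorem pvNodup_filter_beq (c : String) (l : List String) (h : l.Nodup) :
    l.filter (fun x => x == c) = if c ∈ l then [c] else [] := by
  induction l with
  | nil => simp
  | cons a l ih =>
      rw [List.nodup_cons] at h
      by_cases hac : a = c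
      · subst hac
        have hf : l.filter (fun x => x == a) = [] :=
          List.filter_eq_nil_iff.mpr (fun x hx => by
            simp only [beq_iff_eq]
            rintro rfl
            exact h.1 hx)
        simp [List.filter_cons, hf]
      · have hb : ((a == c) : Bool) = false := by simp [hac]
        have hca : ¬ c = a := fun h' => hac h'.symm
        simp [List.filter_cons, hb, ih h.2, hca]

theorem pvEdges_filter (bd : List (String × List String)) (c : String) :
    ((pvEdges bd).filter (fun q => q.1 == c)).map Prod.snd = pvCont bd c := by
  induction bd with
  | nil => rfl
  | cons p bd ih =>
      simp only [pvEdges, List.flatMap_cons]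
      rw [List.filter_append, List.map_append, List.filter_map]
      have hcg : ((PySem.List.dedup p.2).filter ((fun q => q.1 == c) ∘ fun c => (c, p.1)))
          = (PySem.List.dedup p.2).filter (fun x => x == c) :=
        List.filter_congr (fun x _ => rfl)
      rw [hcg, pvNodup_filter_beq c _ (PySem.List.nodup_dedup p.2), show
        (bd.flatMap (fun p => (PySem.List.dedup p.2).map (fun c => (c, p.1)))) = pvEdges bd
        from rfl, ih]
      by_cases h : c ∈ p.2
      · rw [if_pos ((PySem.List.mem_dedup p.2 c).mpr h), show
          pvCont (p :: bd) c = p.1 :: pvCont bd c from by simp [pvCont, List.filterMap_cons, h]]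
        rfl
      · rw [if_neg (fun hc => h ((PySem.List.mem_dedup p.2 c).mp hc)), show
          pvCont (p :: bd) c = pvCont bd c from by simp [pvCont, List.filterMap_cons, h]]
        rfl

theorem pvEdges_mem_iff (bd : List (String × List String)) (c : String) :
    c ∈ (pvEdges bd).map Prod.fst ↔ pvCont bd c ≠ [] := by
  constructor
  · intro h hcont
    obtain ⟨q, hq, hq1⟩ := List.mem_map.mp h
    have : q ∈ (pvEdges bd).filter (fun q => q.1 == c) :=
      List.mem_filter.mpr ⟨hq, by simp [hq1]⟩
    have : q.2 ∈ ((pvEdges bd).filter (fun q => q.1 == c)).map Prod.snd :=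
      List.mem_map_of_mem this
    rw [pvEdges_filter, hcont] at this
    exact (List.not_mem_nil this)
  · intro h
    by_contra hmem
    apply h
    rw [← pvEdges_filter bd c]
    have hnilf : (pvEdges bd).filter (fun q => q.1 == c) = [] :=
      List.filter_eq_nil_iff.mpr (fun q hq => by
        simp only [beq_iff_eq]
        intro hqc
        exact hmem (List.mem_map.mpr ⟨q, hq, hqc⟩))
    rw [hnilf]
    rfl

theorem pvB_get? (bd : List (String × List String)) (c : String) :
    (bd.foldl (fun inv p =>
        (PySem.List.dedup p.2).foldl (fun inv c => inv.modify c [] (· ++ [p.1])) inv)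
        (PySem.Dict.empty : PySem.Dict String (List String))).get? c
      = if pvCont bd c = [] then none else some (pvCont bd c) := by
  rw [pvB_flatten]
  set d := (pvEdges bd).foldl (fun d q => d.modify q.1 [] (· ++ [q.2])) PySem.Dict.empty with hd
  have hgetD : d.getD c [] = pvCont bd c := by
    rw [hd, PySem.Dict.getD_foldl_modify_append]
    simp [pvEdges_filter]
  have hkeys : d.keys = PySem.Set.ofList ((pvEdges bd).map Prod.fst) := by
    rw [hd, PySem.Dict.keys_foldl_modify_key (pvEdges bd) Prod.fst [] (fun _ q => (· ++ [q.2]))]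
    simp [show (PySem.Dict.empty : PySem.Dict String (List String)).keys = [] from rfl,
      PySem.Set.update_nil_left]
  have hcontains : d.contains c = decide (pvCont bd c ≠ []) := by
    rw [PySem.Dict.contains_eq_decide_mem_keys, hkeys]
    simp [PySem.Set.mem_ofList, pvEdges_mem_iff]
  by_cases h : pvCont bd c = []
  · rw [if_pos h]
    exact (PySem.Dict.get?_eq_none_iff_contains d c).mpr (by simp [hcontains, h])
  · simp only [if_neg h]
    have hc : d.contains c = true := by simp [hcontains, h]
    cases hg : d.get? c with
    | none =>
        rw [PySem.Dict.get?_eq_none_iff_contains] at hg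
        simp [hg] at hc
    | some v =>
        rw [PySem.Dict.getD_of_get?_eq_some _ _ hg] at hgetD
        rw [hgetD]

theorem pvB_outer (g : String → Option (List String)) (l : List (String × List String))
    (acc : PySem.Dict String (List String))
    (hnd : (l.map Prod.fst).Nodup) (hfresh : ∀ p ∈ l, acc.contains p.1 = false) :
    (l.foldl (fun acc p =>
        match g p.1 with
        | some v => acc.insert p.1 v
        | none   => acc) acc).items
      = acc.items ++ l.filterMap (fun p => (g p.1).map (fun v => (p.1, v))) := by
  induction l generalizing acc with
  | nil => simp
  | cons p l ih =>
      simp only [List.map_cons, List.nodup_cons] at hnd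
      have hp : acc.contains p.1 = false := hfresh p (by simp)
      simp only [List.foldl_cons, List.filterMap_cons]
      cases hg : g p.1 with
      | none => simpa using ih acc hnd.2 (fun q hq => hfresh q (by simp [hq]))
      | some v =>
          rw [ih _ hnd.2 ?_, PySem.Dict.items_insert_of_not_contains _ _ hp]
          · simp
          · intro q hq
            rw [PySem.Dict.contains_insert]
            have : q.1 ≠ p.1 := by
              intro h; exact hnd.1 (h ▸ (List.mem_map_of_mem hq))
            simp [this, hfresh q (by simp [hq])]

-- ===== VERDICT (by name: the statement is the Claim_ definition above) =====
theorem invert_bag_spec : Claim_equal_invert_bag := by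
  intro bd _ hpre
  unfold Spec_invert_bag invert_bag invert_bag_alt
  have hA : (fun (inv : PySem.Dict String (List String)) (p : String × List String) =>
      bd.foldl (fun inv q =>
        if p.1 ∈ q.2 then
          match inv.get? p.1 with
          | some l => inv.insert p.1 (l ++ [q.1])
          | none   => inv.insert p.1 [q.1]
        else inv) inv) = fun inv p => pvPush inv p.1 (pvCont bd p.1) := by
    funext inv p
    have hstep : (fun (inv : PySem.Dict String (List String)) (q : String × List String) =>
        if p.1 ∈ q.2 then
          match inv.get? p.1 with
          | some l => inv.insert p.1 (l ++ [q.1])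
          | none   => inv.insert p.1 [q.1]
        else inv)
        = fun inv q => if p.1 ∈ q.2 then inv.insert p.1 (inv.getD p.1 [] ++ [q.1]) else inv := by
      funext inv q
      by_cases h : p.1 ∈ q.2
      · simp only [h, if_true, pvA_step]
      · simp only [h, if_false]
    rw [hstep]; exact pvA_inner bd p.1 inv
  rw [hA, pvA_outer bd bd PySem.Dict.empty hpre (by simp),
    pvB_outer _ bd PySem.Dict.empty hpre (by simp)]
  simp only [show (PySem.Dict.empty : PySem.Dict String (List String)).items = [] from rfl,
    List.nil_append]
  apply List.filterMap_congr
  intro p _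
  rw [pvB_get?]
  by_cases h : pvCont bd p.1 = [] <;> simp [h]
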